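-- pv_equiv track=rewrite | github.com/Jiisou/CoOp | visualize_trained_prompt_tsne_from_ckpt.py | resolve_normal_index
-- ===== SOURCE A (Python) =====
-- def resolve_normal_index(classnames, normal_class_name="Normal"):
--     target = normal_class_name.lower()
--     for i, name in enumerate(classnames):
--         if str(name).lower() == target:
--             return i
--     for i, name in enumerate(classnames):
--         if "normal" in str(name).lower():
--             return i
--     return None
-- ===== SOURCE B (Python) =====
-- def resolve_normal_index(classnames, normal_class_name="Normal"):
--     target = normal_class_name.lower()
--     fallback = None
--     for i, name in enumerate(classnames):
--         s = str(name).lower()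
--         if s == target:
--             return i
--         if fallback is None and "normal" in s:
--             fallback = i
--     return fallback
-- ===== Notes on version B (the rewrite author's own statement) =====
-- stated objective: simpler
-- what changed: Replaces A's two full passes (exact-match pass, then substring pass) with a single pass that lowercases each name once and records the first substring hit as a fallback.
import Mathlib
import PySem

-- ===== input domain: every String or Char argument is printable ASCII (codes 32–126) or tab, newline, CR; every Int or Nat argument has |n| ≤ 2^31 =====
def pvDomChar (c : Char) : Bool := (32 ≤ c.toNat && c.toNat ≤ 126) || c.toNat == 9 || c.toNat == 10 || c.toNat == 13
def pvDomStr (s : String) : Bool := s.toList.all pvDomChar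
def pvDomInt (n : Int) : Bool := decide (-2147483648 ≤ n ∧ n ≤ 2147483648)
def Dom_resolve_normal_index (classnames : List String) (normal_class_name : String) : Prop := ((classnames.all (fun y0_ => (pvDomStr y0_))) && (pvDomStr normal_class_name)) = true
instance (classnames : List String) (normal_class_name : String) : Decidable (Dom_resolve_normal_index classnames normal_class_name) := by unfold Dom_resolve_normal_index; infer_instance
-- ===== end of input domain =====

-- B makes a single pass (one lowercasing per element, fallback index recorded) instead of A's two passes: simpler.
-- ===== PORT A =====
-- first loop: return first i with str(name).lower() == target
def pvFindEq (names : List String) (target : String) (i : Int) : Option Int :=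
  match names with
  | [] => none
  | n :: rest => if PySem.Str.lower n == target then some i else pvFindEq rest target (i + 1)

-- second loop: return first i with "normal" in str(name).lower()
def pvFindSub (names : List String) (i : Int) : Option Int :=
  match names with
  | [] => none
  | n :: rest => if PySem.Str.isIn "normal" (PySem.Str.lower n) then some i else pvFindSub rest (i + 1)

def resolve_normal_index (classnames : List String) (normal_class_name : String) : Option Int :=
  let target := PySem.Str.lower normal_class_name
  match pvFindEq classnames target 0 with
  | some i => some i
  | none => pvFindSub classnames 0

-- ===== PORT B =====
-- single loop carrying the fallback
def pvScan (names : List String) (target : String) (i : Int) (fallback : Option Int) : Option Int :=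
  match names with
  | [] => fallback
  | n :: rest =>
    let s := PySem.Str.lower n
    if s == target then some i
    else pvScan rest target (i + 1)
      (if fallback.isNone && PySem.Str.isIn "normal" s then some i else fallback)

def resolve_normal_index_alt (classnames : List String) (normal_class_name : String) : Option Int :=
  pvScan classnames (PySem.Str.lower normal_class_name) 0 none

-- ===== PRECONDITION & SPEC =====
def Spec_resolve_normal_index (classnames : List String) (normal_class_name : String) (out : Option Int) : Prop := out = resolve_normal_index_alt classnames normal_class_name
instance (classnames : List String) (normal_class_name : String) (out : Option Int) : Decidable (Spec_resolve_normal_index classnames normal_class_name out) := by unfold Spec_resolve_normal_index; infer_instance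

-- ===== CLAIM (what is proved, stated in full; the proofs are below) =====
def Claim_equal_resolve_normal_index : Prop := ∀ (classnames : List String) (normal_class_name : String), Dom_resolve_normal_index classnames normal_class_name → Spec_resolve_normal_index classnames normal_class_name (resolve_normal_index classnames normal_class_name)

-- ===== LEMMAS AND PROOFS =====

-- ===== VERDICT (by name: the statement is the Claim_ definition above) =====
theorem pvScan_eq (names : List String) (target : String) (i : Int) (fb : Option Int) :
    pvScan names target i fb =
      match pvFindEq names target i with
      | some j => some j
      | none => match fb with
        | some f => some f
        | none => pvFindSub names i := by
  induction names generalizing i fb with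
  | nil => cases fb <;> simp [pvScan, pvFindEq, pvFindSub]
  | cons n rest ih =>
    simp only [pvScan, pvFindEq, pvFindSub]
    by_cases h : (PySem.Str.lower n == target) = true
    · simp [h]
    · simp only [h, if_false, Bool.false_eq_true]
      rw [ih]
      cases fb with
      | some f => simp
      | none =>
        rcases hs : PySem.Str.isIn "normal" (PySem.Str.lower n) with _ | _ <;>
          simp only [hs, Option.isNone_none, Bool.true_and, Bool.false_eq_true, if_true,
            if_false, reduceIte] <;>
          cases pvFindEq rest target (i + 1) <;> simp

theorem resolve_normal_index_spec : Claim_equal_resolve_normal_index := by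
  intro classnames normal_class_name _
  unfold Spec_resolve_normal_index resolve_normal_index resolve_normal_index_alt
  rw [pvScan_eq]
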